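-- pv_equiv track=rewrite | github.com/MdAbedin/binarysearch | 0109 List Min Replacement.py | solve
-- ===== SOURCE A (Python) =====
-- def solve(nums):
--     mn = nums[0]
--
--     for i in range(len(nums)):
--         old = nums[i]
--         nums[i] = mn
--         mn = min(mn, old)
--
--     nums[0]=0
--
--     return nums
-- ===== SOURCE B (Python) =====
-- def solve(nums):
--     # Divide and conquer: the inclusive prefix-minimum table of a list is the table
--     # of its left half, followed by the table of its right half with the left half's
--     # total minimum folded into every entry. Then shift the table right by one and
--     # zero the head.
--     def scan(xs):
--         if len(xs) <= 1:
--             return xs[:]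
--         mid = len(xs) // 2
--         left = scan(xs[:mid])
--         right = scan(xs[mid:])
--         m = left[-1]
--         return left + [min(m, v) for v in right]
--
--     if nums:
--         acc = scan(nums)
--         nums[1:] = acc[:-1]
--         nums[0] = 0
--     return nums
-- ===== Notes on version B (the rewrite author's own statement) =====
-- stated objective: alternative
-- what changed: B computes the inclusive prefix-minimum table by divide and conquer (recursively scan each half, then fold the left half's total minimum into the right half's table), then writes it back shifted by one with a zero head, instead of A's single left-to-right pass carrying a running minimum.
import Mathlib
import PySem

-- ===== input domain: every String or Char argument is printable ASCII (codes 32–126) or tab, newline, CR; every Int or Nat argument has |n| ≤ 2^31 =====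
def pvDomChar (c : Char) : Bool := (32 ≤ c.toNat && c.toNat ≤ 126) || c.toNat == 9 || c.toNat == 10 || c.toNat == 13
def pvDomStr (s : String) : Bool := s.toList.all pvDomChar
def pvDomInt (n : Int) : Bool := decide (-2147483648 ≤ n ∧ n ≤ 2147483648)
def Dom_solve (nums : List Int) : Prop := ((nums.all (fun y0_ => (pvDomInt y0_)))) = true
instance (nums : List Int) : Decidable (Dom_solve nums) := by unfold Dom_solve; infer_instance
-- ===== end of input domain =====

-- B builds the inclusive prefix-min table by divide and conquer and writes it back
-- shifted with a zero head, instead of A's running-minimum pass; same value, no speed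
-- claim. Both Pythons mutate nums in place; the equivalence is about the returned value.

-- ===== PORT A =====
-- A's loop: at each position write the running min, then fold the old value into it.
def solveLoopA : List Int → Int → List Int
  | [], _ => []
  | x :: xs, mn => mn :: solveLoopA xs (min mn x)

def solve (nums : List Int) : List Int :=
  let mn := nums.headD 0          -- nums[0]; on [] A raises IndexError (excluded by Pre_)
  (solveLoopA nums mn).set 0 0    -- the loop, then nums[0] = 0

-- ===== PORT B =====
-- scan(xs): inclusive prefix-min table by divide and conquer. The Nat argument is
-- fuel bounding the recursion depth (xs.length suffices), only to make the same
-- computation structurally total; it never changes the result.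
def scanBGo : Nat → List Int → List Int
  | 0, xs => xs
  | n + 1, xs =>
    if xs.length ≤ 1 then xs
    else
      let mid := xs.length / 2
      let left := scanBGo n (xs.take mid)
      let right := scanBGo n (xs.drop mid)
      -- left[-1]: left is nonempty here (1 ≤ mid), so getLastD 0 is Python's left[-1]
      left ++ right.map (fun v => min (left.getLastD 0) v)

def scanB (xs : List Int) : List Int := scanBGo xs.length xs

def solve_alt (nums : List Int) : List Int :=
  match nums with
  | [] => []                                   -- 'if nums:' guard: empty list unchanged
  | _ :: _ => 0 :: (scanB nums).dropLast       -- nums[1:] = acc[:-1]; nums[0] = 0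

-- ===== PRECONDITION & SPEC =====
-- A raises IndexError on the empty list (nums[0]); Pre_ excludes exactly it.
def Pre_solve (nums : List Int) : Prop := nums ≠ []
instance (nums : List Int) : Decidable (Pre_solve nums) := by unfold Pre_solve; infer_instance

def pvWitness_solve : List Int := [3, 1, 2]

def Spec_solve (nums : List Int) (out : List Int) : Prop := out = solve_alt nums
instance (nums : List Int) (out : List Int) : Decidable (Spec_solve nums out) := by unfold Spec_solve; infer_instance

-- ===== CLAIM =====
def Claim_equal_solve : Prop := ∀ (nums : List Int), Dom_solve nums → Pre_solve nums → Spec_solve nums (solve nums)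

-- ===== LEMMAS AND PROOFS =====
-- proof-side reference: min of a nonempty list, and the pointwise prefix-min table
def pyMin : List Int → Int
  | [] => 0
  | x :: xs => xs.foldl min x

theorem foldl_min_min (l : List Int) : ∀ (m a : Int),
    List.foldl min (min m a) l = min m (List.foldl min a l) := by
  induction l with
  | nil => intro m a; rfl
  | cons c l ih =>
    intro m a
    simpa [List.foldl, min_assoc] using ih m (min a c)

theorem pyMin_append (a : Int) (l bs : List Int) :
    pyMin ((a :: l) ++ bs) = List.foldl min (pyMin (a :: l)) bs := by
  simp [pyMin, List.foldl_append]

theorem solveLoopA_eq (xs : List Int) : ∀ (mn : Int),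
    solveLoopA xs mn = (List.range xs.length).map (fun j => (xs.take j).foldl min mn) := by
  induction xs with
  | nil => intro mn; simp [solveLoopA]
  | cons x xs ih =>
    intro mn
    simp only [solveLoopA, List.length_cons, List.range_succ_eq_map, List.map_cons,
      List.map_map, ih (min mn x)]
    congr 1

theorem scanBGo_eq (n : Nat) : ∀ (xs : List Int), xs.length ≤ n + 1 →
    scanBGo n xs = (List.range xs.length).map (fun j => pyMin (xs.take (j + 1))) := by
  induction n with
  | zero =>
    intro xs hn
    match xs, hn with
    | [], _ => simp [scanBGo]
    | [x], _ => simp [scanBGo, pyMin]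
  | succ n ih =>
    intro xs hn
    rw [scanBGo]
    split
    case isTrue h =>
      match xs with
      | [] => simp
      | [x] => simp [pyMin]
      | _ :: _ :: _ => simp at h
    case isFalse h =>
      have hlen : 2 ≤ xs.length := by omega
      have hmid1 : 1 ≤ xs.length / 2 := by omega
      have hmid2 : xs.length / 2 < xs.length := by omega
      have htL : (List.take (xs.length / 2) xs).length = xs.length / 2 := by simp; omega
      have htR : (List.drop (xs.length / 2) xs).length = xs.length - xs.length / 2 := by simp
      dsimp only
      rw [ih _ (by rw [htL]; omega), ih _ (by rw [htR]; omega), htL, htR]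
      -- the last entry of the left table is the min of the whole left half
      have hlast : ((List.range (xs.length / 2)).map
          (fun j => pyMin ((List.take (xs.length / 2) xs).take (j + 1)))).getLastD 0
          = pyMin (List.take (xs.length / 2) xs) := by
        obtain ⟨m, hm⟩ : ∃ m, xs.length / 2 = m + 1 := ⟨xs.length / 2 - 1, by omega⟩
        rw [hm, List.range_succ, List.map_append, List.map_cons, List.map_nil,
            List.getLastD_concat]
        congr 1
        rw [← hm, List.take_take, min_self]
      rw [hlast, List.map_map]
      -- split the index range at the midpoint
      conv_rhs => rw [show xs.length = xs.length / 2 + (xs.length - xs.length / 2) by omega]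
      rw [List.range_add, List.map_append, List.map_map]
      congr 1
      · -- left half: taking at most mid elements ignores the right half
        apply List.map_congr_left
        intro j hj
        rw [List.mem_range] at hj
        rw [List.take_take, min_eq_left (by omega)]
      · -- right half: prefix past the midpoint = whole left half ++ prefix of right half
        apply List.map_congr_left
        intro k hk
        rw [List.mem_range] at hk
        have hsplit : xs.take (xs.length / 2 + k + 1)
            = xs.take (xs.length / 2) ++ (xs.drop (xs.length / 2)).take (k + 1) := by
          rw [Nat.add_assoc, List.take_add]
        simp only [Function.comp_apply]
        rw [hsplit]
        obtain ⟨a, l, hL⟩ : ∃ a l, xs.take (xs.length / 2) = a :: l := by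
          cases hL : xs.take (xs.length / 2) with
          | nil =>
              exfalso
              have h0 := congrArg List.length hL
              rw [htL] at h0
              simp at h0
              omega
          | cons a l => exact ⟨a, l, rfl⟩
        obtain ⟨r, R', hR⟩ : ∃ r R', xs.drop (xs.length / 2) = r :: R' := by
          cases hR : xs.drop (xs.length / 2) with
          | nil =>
              exfalso
              have h0 := congrArg List.length hR
              rw [htR] at h0
              simp at h0
              omega
          | cons r R' => exact ⟨r, R', rfl⟩
        rw [hL, hR, List.take_succ_cons, pyMin_append]
        simp only [List.foldl_cons, pyMin, foldl_min_min]

theorem scanB_eq (xs : List Int) :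
    scanB xs = (List.range xs.length).map (fun j => pyMin (xs.take (j + 1))) := by
  cases xs with
  | nil => simp [scanB, scanBGo]
  | cons a rest => exact scanBGo_eq _ _ (Nat.le_succ _)

-- ===== VERDICT =====
theorem solve_spec : Claim_equal_solve := by
  intro nums _ hpre
  unfold Spec_solve
  cases nums with
  | nil => exact absurd rfl hpre
  | cons a rest =>
    simp only [solve, solve_alt, solveLoopA, min_self, List.headD_cons, List.set_cons_zero,
      scanB_eq (a :: rest), List.length_cons, List.range_succ,
      List.map_append, List.map_cons, List.map_nil, List.dropLast_concat,
      solveLoopA_eq rest a]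
    congr 1
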